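-- pv_equiv track=rewrite | github.com/vamsikartik01/Competitive-Programming | Leet-Code-Daily-Challenge/No-of-flowers-fullbloom/python/no-of-flowers-full-bloom.py | fullBloomFlowersMemoryLimitExceded
-- ===== SOURCE A (Python) =====
-- def fullBloomFlowersMemoryLimitExceded(flowers: list[list[int]], people: list[int]) -> list[int]:
--     data = dict()
--     for flower in flowers:
--         for i in range(flower[0], flower[-1]+1):
--             if i in data:
--                 data[i] += 1
--             else:
--                 data[i] = 1
--
--     result = []
--     for person in people:
--         if person in data:
--             result.append(data[person])
--         else:
--             result.append(0)
--
--     return result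
-- ===== SOURCE B (Python) =====
-- def _bisect_right(a, x):
--     lo, hi = 0, len(a)
--     while lo < hi:
--         mid = (lo + hi) // 2
--         if x < a[mid]:
--             hi = mid
--         else:
--             lo = mid + 1
--     return lo
--
--
-- def _bisect_left(a, x):
--     lo, hi = 0, len(a)
--     while lo < hi:
--         mid = (lo + hi) // 2
--         if a[mid] < x:
--             lo = mid + 1
--         else:
--             hi = mid
--     return lo
--
--
-- def fullBloomFlowersMemoryLimitExceded(flowers: list[list[int]], people: list[int]) -> list[int]:
--     # Sort bloom starts and ends once; a person p sees (#starts <= p) - (#ends < p)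
--     # flowers in bloom.  Intervals with end < start never bloom and are dropped.
--     blooming = [f for f in flowers if f[0] <= f[-1]]
--     starts = sorted(f[0] for f in blooming)
--     ends = sorted(f[-1] for f in blooming)
--     return [_bisect_right(starts, p) - _bisect_left(ends, p) for p in people]
-- ===== Notes on version B (the rewrite author's own statement) =====
-- stated objective: alternative
-- what changed: Instead of building a dict counting every integer day inside every bloom interval and looking people up in it, B sorts the bloom starts and ends once and answers each person with bisect_right(starts, p) - bisect_left(ends, p), so no per-day histogram is ever built; it trades A's dependence on interval lengths for an O((F+P) log F) bound, though on short intervals the interpreted bisect is not measurably faster than A's C-level dict.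
import Mathlib
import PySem

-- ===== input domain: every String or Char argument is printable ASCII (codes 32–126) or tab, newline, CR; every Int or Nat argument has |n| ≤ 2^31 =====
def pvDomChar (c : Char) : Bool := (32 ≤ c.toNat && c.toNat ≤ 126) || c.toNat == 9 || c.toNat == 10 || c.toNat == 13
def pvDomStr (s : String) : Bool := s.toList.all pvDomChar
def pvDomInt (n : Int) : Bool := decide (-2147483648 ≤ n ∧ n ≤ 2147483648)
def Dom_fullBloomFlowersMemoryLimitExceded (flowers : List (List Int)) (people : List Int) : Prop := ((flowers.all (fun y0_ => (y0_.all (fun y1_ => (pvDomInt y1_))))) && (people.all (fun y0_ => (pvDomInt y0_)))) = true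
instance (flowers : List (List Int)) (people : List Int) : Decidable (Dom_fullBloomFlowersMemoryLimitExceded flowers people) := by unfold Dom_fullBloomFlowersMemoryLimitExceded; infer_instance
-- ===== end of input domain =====

-- B replaces A's per-day dict histogram by sorted bloom starts/ends queried with bisect per person (alternative algorithm, independent of interval lengths).


-- ===== PORT A =====
-- inner loop: for i in range(flower[0], flower[-1]+1): if i in data: data[i]+=1 else: data[i]=1
-- flower[0] / flower[-1] via pyGet?; the .getD 0 default is never taken under Pre_ (flower nonempty).
def pvAflower (d : PySem.Dict Int Int) (flower : List Int) : PySem.Dict Int Int :=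
  (PySem.List.pyRange ((PySem.List.pyGet? flower 0).getD 0)
      ((PySem.List.pyGet? flower (-1)).getD 0 + 1) 1).foldl
    (fun d i => if d.contains i then d.insert i (d.getD i 0 + 1) else d.insert i 1) d

def fullBloomFlowersMemoryLimitExceded (flowers : List (List Int)) (people : List Int) : List Int :=
  let data := flowers.foldl pvAflower PySem.Dict.empty
  -- data[person] under the 'person in data' guard: getD is exact there
  people.foldl (fun result person =>
    result ++ [if data.contains person then data.getD person 0 else 0]) []

-- ===== PORT B =====
-- _bisect_right / _bisect_left are CPython's bisect loops: ported as PySem.List.bisectRight / bisectLeft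
def fullBloomFlowersMemoryLimitExceded_alt (flowers : List (List Int)) (people : List Int) : List Int :=
  let blooming := flowers.filter
    (fun f => (PySem.List.pyGet? f 0).getD 0 ≤ (PySem.List.pyGet? f (-1)).getD 0)
  let starts := PySem.List.sorted (blooming.map (fun f => (PySem.List.pyGet? f 0).getD 0)) (fun x => x) false
  let ends := PySem.List.sorted (blooming.map (fun f => (PySem.List.pyGet? f (-1)).getD 0)) (fun x => x) false
  people.map (fun p =>
    (PySem.List.bisectRight starts p : Int) - (PySem.List.bisectLeft ends p : Int))

-- ===== PRECONDITION & SPEC =====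
-- Pre_ excludes only inputs where Python A raises IndexError: an empty flower list (flower[0]).
def Pre_fullBloomFlowersMemoryLimitExceded (flowers : List (List Int)) (people : List Int) : Prop :=
  ∀ f ∈ flowers, f ≠ []
instance (flowers : List (List Int)) (people : List Int) : Decidable (Pre_fullBloomFlowersMemoryLimitExceded flowers people) := by unfold Pre_fullBloomFlowersMemoryLimitExceded; infer_instance
def pvWitness_fullBloomFlowersMemoryLimitExceded : List (List Int) × List Int := ([[1, 4], [2, 2]], [0, 2, 5])

def Spec_fullBloomFlowersMemoryLimitExceded (flowers : List (List Int)) (people : List Int) (out : List Int) : Prop := out = fullBloomFlowersMemoryLimitExceded_alt flowers people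
instance (flowers : List (List Int)) (people : List Int) (out : List Int) : Decidable (Spec_fullBloomFlowersMemoryLimitExceded flowers people out) := by unfold Spec_fullBloomFlowersMemoryLimitExceded; infer_instance

-- ===== CLAIM (what is proved, stated in full; the proofs are below) =====
def Claim_equal_fullBloomFlowersMemoryLimitExceded : Prop := ∀ (flowers : List (List Int)) (people : List Int), Dom_fullBloomFlowersMemoryLimitExceded flowers people → Pre_fullBloomFlowersMemoryLimitExceded flowers people → Spec_fullBloomFlowersMemoryLimitExceded flowers people (fullBloomFlowersMemoryLimitExceded flowers people)

-- ===== LEMMAS AND PROOFS =====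

-- A's if-guarded increment is an unconditional insert of getD+1
theorem pvStep_eq (d : PySem.Dict Int Int) (i : Int) :
    (if d.contains i then d.insert i (d.getD i 0 + 1) else d.insert i 1)
      = d.insert i (d.getD i 0 + 1) := by
  by_cases h : d.contains i = true
  · simp [h]
  · simp [h, PySem.Dict.getD_of_not_contains d 0 (by simpa using h)]

-- lookup after A's inner loop: old value plus the interval-membership indicator
theorem pvAflower_getD (d : PySem.Dict Int Int) (f : List Int) (p : Int) :
    (pvAflower d f).getD p 0
      = d.getD p 0 + (if (PySem.List.pyGet? f 0).getD 0 ≤ p ∧ p ≤ (PySem.List.pyGet? f (-1)).getD 0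
                      then 1 else 0) := by
  unfold pvAflower
  have hfun : (fun (d : PySem.Dict Int Int) (i : Int) =>
      if d.contains i then d.insert i (d.getD i 0 + 1) else d.insert i 1)
      = fun d i => d.insert i (d.getD i 0 + 1) := by
    funext d i; exact pvStep_eq d i
  rw [hfun, PySem.Dict.getD_foldl_insert_add_one]
  set a := (PySem.List.pyGet? f 0).getD 0
  set b := (PySem.List.pyGet? f (-1)).getD 0
  by_cases hp : a ≤ p ∧ p ≤ b
  · have hm : p ∈ PySem.List.pyRange a (b + 1) 1 := by
      rw [PySem.List.mem_pyRange_one]; omega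
    rw [List.count_eq_one_of_mem (PySem.List.nodup_pyRange_one a (b+1)) hm]
    simp [hp]
  · have hm : p ∉ PySem.List.pyRange a (b + 1) 1 := by
      rw [PySem.List.mem_pyRange_one]; omega
    rw [List.count_eq_zero_of_not_mem hm]
    simp [hp]

-- lookup in A's full dict = the sum of the per-flower interval indicators
theorem pvData_getD (flowers : List (List Int)) (d : PySem.Dict Int Int) (p : Int) :
    (flowers.foldl pvAflower d).getD p 0
      = d.getD p 0 +
        (flowers.map (fun f =>
          if (PySem.List.pyGet? f 0).getD 0 ≤ p ∧ p ≤ (PySem.List.pyGet? f (-1)).getD 0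
          then (1 : Int) else 0)).sum := by
  induction flowers generalizing d with
  | nil => simp
  | cons f fs ih =>
    simp only [List.foldl_cons, List.map_cons, List.sum_cons]
    rw [ih (pvAflower d f), pvAflower_getD]
    ring

-- the guarded lookup in A's result loop is just getD
theorem pvLookup_eq (d : PySem.Dict Int Int) (p : Int) :
    (if d.contains p then d.getD p 0 else 0) = d.getD p 0 := by
  by_cases h : d.contains p = true
  · simp [h]
  · simp [h, PySem.Dict.getD_of_not_contains d 0 (by simpa using h)]

-- a countP whose predicate holds exactly on a prefix of length n equals n
theorem pvCountP_eq_of_split (xs : List Int) (P : Int → Bool) (n : Nat) (hn : n ≤ xs.length)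
    (h1 : ∀ j (hj : j < xs.length), j < n → P xs[j] = true)
    (h2 : ∀ j (hj : j < xs.length), n ≤ j → P xs[j] = false) :
    xs.countP P = n := by
  conv_lhs => rw [← List.take_append_drop n xs]
  rw [List.countP_append]
  have hT : (xs.take n).countP P = (xs.take n).length := by
    rw [List.countP_eq_length]
    intro a ha
    obtain ⟨j, hj, rfl⟩ := List.mem_iff_getElem.mp ha
    have hj' := hj
    simp only [List.length_take] at hj'
    rw [List.getElem_take]
    exact h1 j (by omega) (by omega)
  have hD : (xs.drop n).countP P = 0 := by
    rw [List.countP_eq_zero]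
    intro a ha
    obtain ⟨j, hj, rfl⟩ := List.mem_iff_getElem.mp ha
    have hj' := hj
    simp only [List.length_drop] at hj'
    rw [List.getElem_drop]
    simp [h2 (n + j) (by omega) (by omega)]
  rw [hT, hD, List.length_take]
  omega

-- bisect_right on an ascending list counts the elements ≤ p
theorem pvBisectRight_count (xs : List Int) (p : Int) (h : List.Pairwise (· ≤ ·) xs) :
    PySem.List.bisectRight xs p = xs.countP (fun x => decide (x ≤ p)) := by
  obtain ⟨hle, h1, h2⟩ := PySem.List.bisectRight_spec xs p h
  refine (pvCountP_eq_of_split xs _ _ hle (fun j hj hlt => ?_) (fun j hj hge => ?_)).symm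
  · simpa using h1 j hj hlt
  · have := h2 j hj hge
    simp; omega

-- bisect_left on an ascending list counts the elements < p
theorem pvBisectLeft_count (xs : List Int) (p : Int) (h : List.Pairwise (· ≤ ·) xs) :
    PySem.List.bisectLeft xs p = xs.countP (fun x => decide (x < p)) := by
  obtain ⟨hle, h1, h2⟩ := PySem.List.bisectLeft_spec xs p h
  refine (pvCountP_eq_of_split xs _ _ hle (fun j hj hlt => ?_) (fun j hj hge => ?_)).symm
  · simpa using h1 j hj hlt
  · have := h2 j hj hge
    simp; omega

-- the indicator sum equals (#blooming with start ≤ p) - (#blooming with end < p)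
theorem pvSum_eq_counts (fs : List (List Int)) (p : Int) :
    (fs.map (fun f =>
        if (PySem.List.pyGet? f 0).getD 0 ≤ p ∧ p ≤ (PySem.List.pyGet? f (-1)).getD 0
        then (1 : Int) else 0)).sum
      = (fs.countP (fun f => decide ((PySem.List.pyGet? f 0).getD 0 ≤ p)
            && decide ((PySem.List.pyGet? f 0).getD 0 ≤ (PySem.List.pyGet? f (-1)).getD 0)) : Int)
        - (fs.countP (fun f => decide ((PySem.List.pyGet? f (-1)).getD 0 < p)
            && decide ((PySem.List.pyGet? f 0).getD 0 ≤ (PySem.List.pyGet? f (-1)).getD 0)) : Int) := by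
  induction fs with
  | nil => simp
  | cons f fs ih =>
    simp only [List.map_cons, List.sum_cons, List.countP_cons]
    push_cast
    rw [ih]
    by_cases h1 : (PySem.List.pyGet? f 0).getD 0 ≤ p <;>
      by_cases h2 : p ≤ (PySem.List.pyGet? f (-1)).getD 0 <;>
      by_cases h3 : (PySem.List.pyGet? f 0).getD 0 ≤ (PySem.List.pyGet? f (-1)).getD 0 <;>
      simp [h1, h2, h3] <;> omega

-- ===== VERDICT (by name: the statement is the Claim_ definition above) =====
theorem fullBloomFlowersMemoryLimitExceded_spec : Claim_equal_fullBloomFlowersMemoryLimitExceded := by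
  intro flowers people _ _
  unfold Spec_fullBloomFlowersMemoryLimitExceded fullBloomFlowersMemoryLimitExceded
    fullBloomFlowersMemoryLimitExceded_alt
  rw [PySem.List.foldl_append_singleton_eq_map]
  refine List.map_congr_left (fun p _ => ?_)
  rw [pvLookup_eq, pvData_getD,
      pvBisectRight_count _ _ (PySem.List.sorted_pairwise _ _),
      pvBisectLeft_count _ _ (PySem.List.sorted_pairwise _ _),
      List.Perm.countP_eq _ (PySem.List.sorted_perm _ _ _),
      List.Perm.countP_eq _ (PySem.List.sorted_perm _ _ _),
      List.countP_map, List.countP_map, List.countP_filter, List.countP_filter]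
  simp only [PySem.Dict.getD_empty, zero_add, Function.comp]
  exact pvSum_eq_counts flowers p
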